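-- pv_equiv track=rewrite | github.com/Jordan-Kowal/challenges | advent_of_code/2020/day_06.py | merge_group_answers_with_count
-- ===== SOURCE A (Python) =====
-- def merge_group_answers_with_count(file_content):
--     """
--     Merges the group answers together and count the number of people in each group
--     :param [str] file_content: Content from the input file
--     :return: For each group, a long string of all the answers and the number of people
--     :rtype: [(str, int)]
--     """
--     group_info = []
--     merged_answer = ""
--     people = 0
--     for line in file_content:
--         if line != "":
--             merged_answer += f"{line}"
--             people += 1
--         else:
--             group_info.append((merged_answer, people))
--             merged_answer = ""
--             people = 0
--     group_info.append((merged_answer, people))  # Adding the last one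
--     return group_info
-- ===== SOURCE B (Python) =====
-- def merge_group_answers_with_count(file_content):
--     # Divide-and-conquer on the separator: find the first empty line, emit the
--     # group before it, recurse on the lines after it; no separator means the
--     # whole remainder is the final group.
--     try:
--         i = file_content.index("")
--     except ValueError:
--         return [("".join(file_content), len(file_content))]
--     return [("".join(file_content[:i]), i)] + merge_group_answers_with_count(file_content[i + 1:])
-- ===== Notes on version B (the rewrite author's own statement) =====
-- stated objective: alternative
-- what changed: B is a recursive divide-and-conquer on the separator: it searches for the first empty line with list.index, slices the group before it and joins it in one bulk ''.join, then recurses on the suffix, instead of A's single imperative pass growing a merged string and people counter line by line.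
import Mathlib
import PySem

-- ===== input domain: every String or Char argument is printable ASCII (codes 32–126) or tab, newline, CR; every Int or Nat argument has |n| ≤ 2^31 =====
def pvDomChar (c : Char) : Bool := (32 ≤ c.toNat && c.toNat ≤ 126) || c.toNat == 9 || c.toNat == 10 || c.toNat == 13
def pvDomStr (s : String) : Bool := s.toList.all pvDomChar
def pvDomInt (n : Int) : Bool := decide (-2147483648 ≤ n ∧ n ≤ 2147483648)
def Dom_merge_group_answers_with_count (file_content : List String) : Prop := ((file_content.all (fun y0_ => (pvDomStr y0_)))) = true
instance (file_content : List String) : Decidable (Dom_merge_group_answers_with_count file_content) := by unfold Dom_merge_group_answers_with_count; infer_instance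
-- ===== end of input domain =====

-- B replaces A's single imperative pass (running merged string + counter) by a recursive
-- divide-and-conquer on the separator: find the first empty line, emit the group before it,
-- recurse on the suffix after it; same output, different decomposition (objective: alternative).

-- ===== PORT A =====
-- A's per-line loop body
def pvStepA (st : List (String × Int) × String × Int) (line : String) :
    List (String × Int) × String × Int :=
  if line ≠ "" then (st.1, st.2.1 ++ line, st.2.2 + 1)
  else (st.1 ++ [(st.2.1, st.2.2)], "", 0)

def merge_group_answers_with_count (file_content : List String) : List (String × Int) :=
  let st := file_content.foldl pvStepA ([], "", 0)
  st.1 ++ [(st.2.1, st.2.2)]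

-- ===== PORT B =====
-- file_content.index("") → PySem.List.index?; the slices file_content[:i] / file_content[i+1:]
-- with the nonnegative index i are List.take i / List.drop (i+1) (exact: PySem.List.slice_to_natCast /
-- slice_from_natCast); "".join → String.join.
def merge_group_answers_with_count_alt (file_content : List String) : List (String × Int) :=
  match h : PySem.List.index? file_content "" with
  | none => [(String.join file_content, (file_content.length : Int))]
  | some i =>
      (String.join (file_content.take i), (i : Int)) ::
        merge_group_answers_with_count_alt (file_content.drop (i + 1))
termination_by file_content.length
decreasing_by
  obtain ⟨hk, -, -⟩ := PySem.List.getElem_of_index?_eq_some h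
  simp [List.length_drop]; omega

-- ===== PRECONDITION & SPEC =====
def Spec_merge_group_answers_with_count (file_content : List String) (out : List (String × Int)) : Prop := out = merge_group_answers_with_count_alt file_content
instance (file_content : List String) (out : List (String × Int)) : Decidable (Spec_merge_group_answers_with_count file_content out) := by unfold Spec_merge_group_answers_with_count; infer_instance

-- ===== CLAIM (what is proved, stated in full; the proofs are below) =====
def Claim_equal_merge_group_answers_with_count : Prop := ∀ (file_content : List String), Dom_merge_group_answers_with_count file_content → Spec_merge_group_answers_with_count file_content (merge_group_answers_with_count file_content)

-- ===== LEMMAS AND PROOFS =====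

-- the group-list component of A's state is append-only
theorem pv_gi_acc (l : List String) (gi : List (String × Int)) (m : String) (p : Int) :
    l.foldl pvStepA (gi, m, p) =
      (gi ++ (l.foldl pvStepA ([], m, p)).1, (l.foldl pvStepA ([], m, p)).2) := by
  induction l generalizing gi m p with
  | nil => simp
  | cons x t ih =>
    by_cases hx : x = ""
    · subst hx
      simp only [List.foldl_cons, pvStepA, if_neg (not_not_intro rfl), List.nil_append]
      rw [ih (gi ++ [(m, p)]), ih [(m, p)]]
      simp
    · simp only [List.foldl_cons, pvStepA, if_pos hx]
      exact ih gi (m ++ x) (p + 1)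

theorem pv_foldl_append (t : List String) (x : String) :
    t.foldl (fun r s => r ++ s) x = x ++ t.foldl (fun r s => r ++ s) "" := by
  induction t generalizing x with
  | nil => simp
  | cons h tl ih =>
    simp only [List.foldl_cons]
    rw [ih (x ++ h), ih ("" ++ h)]
    simp [String.append_assoc]

-- over a run of non-empty lines A only extends the running string and counter
theorem pv_run_noempty (l : List String) (hne : "" ∉ l) (gi : List (String × Int)) (m : String) (p : Int) :
    l.foldl pvStepA (gi, m, p) = (gi, m ++ String.join l, p + l.length) := by
  induction l generalizing m p with
  | nil => simp [String.join]
  | cons x t ih =>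
    have hx : x ≠ "" := by rintro rfl; exact hne (by simp)
    simp only [List.foldl_cons, pvStepA, if_pos hx]
    rw [ih (by intro h; exact hne (List.mem_cons_of_mem _ h)) (m ++ x) (p + 1)]
    have hj : (m ++ x) ++ String.join t = m ++ String.join (x :: t) := by
      simp only [String.join, List.foldl_cons]
      rw [pv_foldl_append t ("" ++ x)]
      simp [String.append_assoc]
    have hp : p + 1 + (t.length : Int) = p + ((x :: t).length : Int) := by
      push_cast [List.length_cons]; omega
    rw [hj, hp]

-- main equivalence, by recursion on the first empty line (mirrors B's structure)
theorem pv_main (file_content : List String) :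
    merge_group_answers_with_count file_content = merge_group_answers_with_count_alt file_content := by
  rw [merge_group_answers_with_count_alt]
  split
  · next h =>
    have hne : "" ∉ file_content := (PySem.List.index?_eq_none_iff _ _).1 h
    simp only [merge_group_answers_with_count]
    rw [pv_run_noempty file_content hne [] "" 0]
    simp
  · next i h =>
    obtain ⟨pre, suf, hfc, hlen, hpre⟩ := (PySem.List.index?_eq_some_iff _ _ _).1 h
    have ih := pv_main (file_content.drop (i + 1))
    subst hfc
    have htake : (pre ++ "" :: suf).take i = pre := by rw [← hlen]; simp
    have hdrop : (pre ++ "" :: suf).drop (i + 1) = suf := by rw [← hlen]; simp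
    rw [hdrop] at ih
    rw [htake, hdrop]
    simp only [merge_group_answers_with_count] at ih ⊢
    rw [List.foldl_append, pv_run_noempty pre hpre [] "" 0]
    simp only [List.foldl_cons, pvStepA, if_neg (not_not_intro rfl), List.nil_append]
    rw [pv_gi_acc]
    simp only [List.cons_append, List.append_assoc] at ih ⊢
    rw [ih]
    simp [hlen]
termination_by file_content.length
decreasing_by
  have hl : file_content.length = pre.length + (suf.length + 1) := by rw [hfc]; simp
  simp only [List.length_drop]
  omega

-- ===== VERDICT (by name: the statement is the Claim_ definition above) =====
theorem merge_group_answers_with_count_spec : Claim_equal_merge_group_answers_with_count := by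
  intro fc _
  exact pv_main fc
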